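-- pv_equiv track=rewrite | github.com/CryAndRRich/hustack | leetcode/binary_search/2819_Minimum_Relative_Loss_After_Buying_Chocolates/codes/bs.py | minimumRelativeLosses
-- ===== SOURCE A (Python) =====
-- from typing import List
--
-- def minimumRelativeLosses(prices: List[int], queries: List[List[int]]) -> List[int]:
--     prices.sort()
--     n = len(prices)
--     sum_arr = [0] * (n + 1)
--     for i in range(1, n + 1):
--         sum_arr[i] = sum_arr[i - 1] + prices[i - 1]
--
--     m = len(queries)
--     ind = list(range(m))
--     ind.sort(key=lambda x: queries[x][0])
--     j = 0
--     result = [0] * m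
--
--     for i in ind:
--         p, num = queries[i]
--         pp = p << 1
--         while j < n and prices[j] <= p:
--             j += 1
--         num1 = min(num, j)
--         left, right = 1, min(num1, n - num)
--         while left <= right:
--             mid = (left + right) >> 1
--             if prices[num1 - mid] > pp - prices[n - (num - num1) - mid]:
--                 left = mid + 1
--             else:
--                 right = mid - 1
--         num1 -= left - 1
--         num2 = num - num1
--         result[i] = num2 * pp - (sum_arr[n] - sum_arr[n - num2]) + sum_arr[num1]
--
--     return result
-- ===== SOURCE B (Python) =====
-- from typing import List
--
-- def minimumRelativeLosses(prices: List[int], queries: List[List[int]]) -> List[int]: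
--     # Same return value as the original; prices is sorted in place just like A.
--     # Instead of sorting queries and sweeping a shared pointer + binary-searching
--     # the split point, answer each query independently: count prices <= p with a
--     # plain scan, then find the split point by a linear scan over the monotone
--     # predicate instead of A's binary search.
--     prices.sort()
--     n = len(prices)
--     prefix = [0]
--     for x in prices:
--         prefix.append(prefix[-1] + x)
--
--     result = []
--     for p, num in queries:
--         pp = 2 * p
--         cnt = sum(1 for x in prices if x <= p)
--         a = min(num, cnt)            # candidates bought at their own price
--         limit = min(a, n - num)
--         t = 0
--         while t < limit and prices[a - t - 1] > pp - prices[n - (num - a) - t - 1]: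
--             t += 1
--         num1 = a - t
--         num2 = num - num1
--         result.append(num2 * pp - (prefix[n] - prefix[n - num2]) + prefix[num1])
--     return result
-- ===== Notes on version B (the rewrite author's own statement) =====
-- stated objective: simpler
-- what changed: Drops A's sort-queries-by-price + index list + shared monotonic pointer + scatter-into-preallocated-result machinery and answers each query independently in original order, counting prices <= p with a plain scan and replacing A's inner binary search for the split point by a linear scan of the same monotone predicate.
import Mathlib
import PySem

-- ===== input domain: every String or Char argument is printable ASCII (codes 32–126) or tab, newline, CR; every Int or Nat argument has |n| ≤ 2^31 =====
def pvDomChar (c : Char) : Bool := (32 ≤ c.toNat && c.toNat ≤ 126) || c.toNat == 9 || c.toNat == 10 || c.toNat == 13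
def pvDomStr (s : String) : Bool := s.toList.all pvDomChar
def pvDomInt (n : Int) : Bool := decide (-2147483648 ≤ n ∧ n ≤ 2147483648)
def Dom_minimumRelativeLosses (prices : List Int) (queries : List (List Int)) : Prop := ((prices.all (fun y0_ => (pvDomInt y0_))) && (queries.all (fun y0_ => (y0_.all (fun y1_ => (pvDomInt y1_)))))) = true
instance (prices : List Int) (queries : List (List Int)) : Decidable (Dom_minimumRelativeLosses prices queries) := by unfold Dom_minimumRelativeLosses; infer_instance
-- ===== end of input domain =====

-- B answers each query independently in original order (no query sorting, no index list,
-- no shared monotonic pointer, no scatter into a preallocated result) and replaces A's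
-- binary search for the split point by a linear scan of the same monotone predicate
-- (objective: simpler).  Both A and B sort `prices` IN PLACE (same mutation); the
-- equivalence proved here is about the return value.

-- ===== PORT A =====
-- A's prefix-sum array: sum_arr = [0]*(n+1); for i in range(1, n+1): sum_arr[i] = sum_arr[i-1] + prices[i-1]
def pvSumArr (ps : List Int) : List Int :=
  (PySem.List.pyRange 1 ((ps.length : Int) + 1) 1).foldl
    (fun s i => PySem.List.pySetD s i (PySem.List.pyGetD s (i - 1) 0 + PySem.List.pyGetD ps (i - 1) 0))
    (List.replicate (ps.length + 1) 0)

-- A's inner binary search; returns the final `left`.  `(left+right) >> 1` is floor division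
-- by 2 (PySem.Int.floordiv); fuel = the interval size, which strictly decreases.
def pvSplitGo (ps : List Int) (pp num num1 : Int) : Nat → Int → Int → Int
  | 0, left, _ => left
  | fuel + 1, left, right =>
    if left ≤ right then
      let mid := PySem.Int.floordiv (left + right) 2
      if PySem.List.pyGetD ps (num1 - mid) 0 > pp - PySem.List.pyGetD ps ((ps.length : Int) - (num - num1) - mid) 0 then
        pvSplitGo ps pp num num1 fuel (mid + 1) right
      else
        pvSplitGo ps pp num num1 fuel left (mid - 1)
    else left

def pvSplit (ps : List Int) (pp num num1 : Int) (left right : Int) : Int :=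
  pvSplitGo ps pp num num1 (right + 1 - left).toNat left right

-- A's monotonic-pointer while loop: `while j < n and prices[j] <= p: j += 1`
def pvAdvanceGo (ps : List Int) (p : Int) : Nat → Nat → Nat
  | 0, j => j
  | fuel + 1, j => if j < ps.length ∧ ps.getD j 0 ≤ p then pvAdvanceGo ps p fuel (j + 1) else j

def pvAdvance (ps : List Int) (p : Int) (j : Nat) : Nat :=
  pvAdvanceGo ps p (ps.length - j) j

-- everything A does for one query once the pointer value j is known (`p << 1` is `p <<< 1`)
def pvBodyA (ps pre : List Int) (p num cnt : Int) : Int :=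
  let n : Int := ps.length
  let pp := p <<< (1 : Nat)
  let num1 := min num cnt
  let left := pvSplit ps pp num num1 1 (min num1 (n - num))
  let num1' := num1 - (left - 1)
  let num2 := num - num1'
  num2 * pp - (PySem.List.pyGetD pre n 0 - PySem.List.pyGetD pre (n - num2) 0) + PySem.List.pyGetD pre num1' 0

def minimumRelativeLosses (prices : List Int) (queries : List (List Int)) : List Int :=
  let ps := PySem.List.sorted prices (fun x => x) false
  let pre := pvSumArr ps
  let m := queries.length
  let ind := PySem.List.sorted (List.range m)
      (fun x => (PySem.List.pyGet? (queries.getD x []) 0).getD 0) false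
  (ind.foldl (fun (st : Nat × List Int) i =>
      let q := queries.getD i []
      let p := (PySem.List.pyGet? q 0).getD 0
      let num := (PySem.List.pyGet? q 1).getD 0
      let j := pvAdvance ps p st.1
      (j, st.2.set i (pvBodyA ps pre p num (j : Int)))) (0, List.replicate m 0)).2

-- ===== PORT B =====
-- B's prefix sums: prefix = [0]; for x in prices: prefix.append(prefix[-1] + x)
def pvPrefixB (ps : List Int) : List Int :=
  ps.foldl (fun s x => s ++ [PySem.List.pyGetD s (-1) 0 + x]) [0]

-- B's linear scan: t = 0; while t < limit and prices[a-t-1] > pp - prices[n-(num-a)-t-1]: t += 1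
def pvScanGo (ps : List Int) (pp num a limit : Int) : Nat → Int → Int
  | 0, t => t
  | fuel + 1, t =>
    if t < limit ∧ PySem.List.pyGetD ps (a - t - 1) 0 > pp - PySem.List.pyGetD ps ((ps.length : Int) - (num - a) - t - 1) 0
    then pvScanGo ps pp num a limit fuel (t + 1) else t

def pvScan (ps : List Int) (pp num a limit : Int) : Int :=
  pvScanGo ps pp num a limit limit.toNat 0

def minimumRelativeLosses_alt (prices : List Int) (queries : List (List Int)) : List Int :=
  let ps := PySem.List.sorted prices (fun x => x) false
  let n : Int := ps.length
  let pre := pvPrefixB ps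
  queries.map (fun q =>
    let p := (PySem.List.pyGet? q 0).getD 0
    let num := (PySem.List.pyGet? q 1).getD 0
    let pp := 2 * p
    let cnt : Int := ((ps.filter (fun x => decide (x ≤ p))).map (fun _ => (1 : Int))).sum
    let a := min num cnt
    let limit := min a (n - num)
    let t := pvScan ps pp num a limit
    let num1 := a - t
    let num2 := num - num1
    num2 * pp - (PySem.List.pyGetD pre n 0 - PySem.List.pyGetD pre (n - num2) 0) + PySem.List.pyGetD pre num1 0)

-- ===== PRECONDITION & SPEC =====
-- Pre_ holds exactly when the Python returns normally: it excludes queries that are not pairs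
-- (unpacking raises ValueError) and num values so far outside range that the
-- sum_arr negative-index access raises IndexError.
def Pre_minimumRelativeLosses (prices : List Int) (queries : List (List Int)) : Prop :=
  ∀ q ∈ queries, q.length = 2 ∧
    -((prices.length : Int) + 1) ≤ q.getD 1 0 ∧
    q.getD 1 0 - min (q.getD 1 0) ((prices.countP (fun x => decide (x ≤ q.getD 0 0)) : Int))
      ≤ 2 * (prices.length : Int) + 1
instance (prices : List Int) (queries : List (List Int)) : Decidable (Pre_minimumRelativeLosses prices queries) := by
  unfold Pre_minimumRelativeLosses; infer_instance

def pvWitness_minimumRelativeLosses : List Int × List (List Int) :=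
  ([1, 5, 7], [[2, 2], [4, 3], [6, 1]])

def Spec_minimumRelativeLosses (prices : List Int) (queries : List (List Int)) (out : List Int) : Prop := out = minimumRelativeLosses_alt prices queries
instance (prices : List Int) (queries : List (List Int)) (out : List Int) : Decidable (Spec_minimumRelativeLosses prices queries out) := by unfold Spec_minimumRelativeLosses; infer_instance

-- ===== CLAIM (what is proved, stated in full; the proofs are below) =====
def Claim_equal_minimumRelativeLosses : Prop := ∀ (prices : List Int) (queries : List (List Int)), Dom_minimumRelativeLosses prices queries → Pre_minimumRelativeLosses prices queries → Spec_minimumRelativeLosses prices queries (minimumRelativeLosses prices queries)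

-- ===== LEMMAS AND PROOFS =====

-- number of prices ≤ p at the front of the (sorted) list: the value A's pointer reaches
def pvTwl (ps : List Int) (p : Int) : Nat := (ps.takeWhile (fun x => decide (x ≤ p))).length

lemma pv_tw_le_len (l : List Int) (f : Int → Bool) : (l.takeWhile f).length ≤ l.length :=
  (List.takeWhile_sublist f).length_le

lemma pv_tw_lt (l : List Int) (f : Int → Bool) :
    ∀ i, i < (l.takeWhile f).length → f (l.getD i 0) = true := by
  induction l with
  | nil => intro i h; simp at h
  | cons x t ih =>
    intro i h
    by_cases hx : f x
    · cases i with
      | zero => simpa using hx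
      | succ i => simp only [List.takeWhile_cons, hx, if_true, List.length_cons] at h
                  simpa using ih i (by omega)
    · simp [List.takeWhile_cons, hx] at h

lemma pv_tw_stop (l : List Int) (f : Int → Bool)
    (h : (l.takeWhile f).length < l.length) :
    f (l.getD (l.takeWhile f).length 0) = false := by
  induction l with
  | nil => simp at h
  | cons x t ih =>
    by_cases hx : f x
    · simp only [List.takeWhile_cons, hx, if_true, List.length_cons] at h ⊢
      simpa using ih (by omega)
    · simpa [List.takeWhile_cons, hx] using hx

lemma pv_advGo_eq (ps : List Int) (p : Int) :
    ∀ (fuel j : Nat), ps.length - j ≤ fuel → j ≤ pvTwl ps p →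
    pvAdvanceGo ps p fuel j = pvTwl ps p := by
  intro fuel
  induction fuel with
  | zero =>
    intro j hfuel hj
    have hlen := pv_tw_le_len ps (fun x => decide (x ≤ p))
    have : j = pvTwl ps p := by unfold pvTwl at hj ⊢; omega
    simpa [pvAdvanceGo] using this
  | succ fuel ih =>
    intro j hfuel hj
    rcases Nat.lt_or_ge j (pvTwl ps p) with h | h
    · have hlen : j < ps.length := lt_of_lt_of_le h (pv_tw_le_len ps _)
      have hpred := pv_tw_lt ps (fun x => decide (x ≤ p)) j h
      rw [pvAdvanceGo, if_pos ⟨hlen, by simpa using hpred⟩]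
      exact ih (j + 1) (by omega) h
    · have hje : j = pvTwl ps p := le_antisymm hj h
      rw [pvAdvanceGo, if_neg]
      · exact hje
      · rintro ⟨hlen, hle⟩
        have := pv_tw_stop ps (fun x => decide (x ≤ p)) (by rw [← pvTwl, ← hje]; exact hlen)
        rw [show (List.takeWhile (fun x => decide (x ≤ p)) ps).length = pvTwl ps p from rfl, ← hje] at this
        rw [List.getD_eq_getElem?_getD, List.getElem?_eq_getElem hlen] at hle
        simp only [Option.getD_some] at hle
        simp [List.getElem?_eq_getElem hlen] at this
        omega

lemma pv_adv_eq (ps : List Int) (p : Int) (j : Nat) (hj : j ≤ pvTwl ps p) :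
    pvAdvance ps p j = pvTwl ps p :=
  pv_advGo_eq ps p (ps.length - j) j le_rfl hj

lemma pv_twl_mono (ps : List Int) {p p' : Int} (h : p ≤ p') : pvTwl ps p ≤ pvTwl ps p' := by
  induction ps with
  | nil => simp [pvTwl]
  | cons x t ih =>
    by_cases hx : x ≤ p
    · have hx' : x ≤ p' := le_trans hx h
      simpa [pvTwl, List.takeWhile_cons, hx, hx'] using ih
    · simp [pvTwl, List.takeWhile_cons, hx]

lemma pv_countP_eq_twl (ps : List Int) (p : Int) (hs : ps.Pairwise (· ≤ ·)) :
    ps.countP (fun x => decide (x ≤ p)) = pvTwl ps p := by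
  induction ps with
  | nil => simp [pvTwl]
  | cons x t ih =>
    rcases List.pairwise_cons.mp hs with ⟨hx, ht⟩
    by_cases hxp : x ≤ p
    · simpa [pvTwl, List.countP_cons, List.takeWhile_cons, hxp] using ih ht
    · have hz : t.countP (fun x => decide (x ≤ p)) = 0 := by
        rw [List.countP_eq_zero]
        intro y hy
        simp only [decide_eq_true_eq]
        intro hyp
        exact hxp (le_trans (hx y hy) hyp)
      simp [pvTwl, List.countP_cons, List.takeWhile_cons, hxp, hz]

-- ---- the two prefix-sum builds agree: both are 0 :: running sums ----

def pvTailSums : Int → List Int → List Int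
  | _, [] => []
  | a, x :: t => (a + x) :: pvTailSums (a + x) t

lemma pv_tailSums_length : ∀ (l : List Int) (a : Int), (pvTailSums a l).length = l.length := by
  intro l
  induction l with
  | nil => intro a; rfl
  | cons x t ih => intro a; simp [pvTailSums, ih]

lemma pv_tailSums_append : ∀ (l : List Int) (a x : Int),
    pvTailSums a (l ++ [x]) = pvTailSums a l ++ [a + l.sum + x] := by
  intro l
  induction l with
  | nil => intro a x; simp [pvTailSums]
  | cons y t ih =>
    intro a x
    simp only [List.cons_append, pvTailSums, ih, List.sum_cons]
    have h : a + y + t.sum + x = a + (y + t.sum) + x := by ring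
    rw [h]

lemma pv_getD_tailSums_last : ∀ (l : List Int) (a : Int),
    (a :: pvTailSums a l).getD l.length 0 = a + l.sum := by
  intro l
  induction l with
  | nil => intro a; simp
  | cons y t ih =>
    intro a
    simpa [pvTailSums, List.sum_cons, ← add_assoc] using ih (a + y)

lemma pv_prefixB_go : ∀ (ps l : List Int) (a : Int),
    ps.foldl (fun s x => s ++ [PySem.List.pyGetD s (-1) 0 + x]) (l ++ [a])
      = l ++ [a] ++ pvTailSums a ps := by
  intro ps
  induction ps with
  | nil => intro l a; simp [pvTailSums]
  | cons x t ih =>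
    intro l a
    simp only [List.foldl_cons, PySem.List.pyGetD_neg_one_append_singleton, pvTailSums]
    rw [show (l ++ [a]) ++ [a + x] = (l ++ [a]) ++ [a + x] from rfl, ih (l ++ [a]) (a + x)]
    simp

lemma pv_prefixB_eq (ps : List Int) : pvPrefixB ps = 0 :: pvTailSums 0 ps := by
  simpa using pv_prefixB_go ps [] 0

lemma pv_sumArr_go (ps : List Int) : ∀ (k : Nat), k ≤ ps.length →
    (PySem.List.pyRange 1 ((k : Int) + 1) 1).foldl
      (fun s i => PySem.List.pySetD s i (PySem.List.pyGetD s (i - 1) 0 + PySem.List.pyGetD ps (i - 1) 0))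
      (List.replicate (ps.length + 1) 0)
    = (0 :: pvTailSums 0 (ps.take k)) ++ List.replicate (ps.length - k) 0 := by
  intro k
  induction k with
  | zero =>
    intro _
    rw [PySem.List.pyRange_one_eq_nil (by omega)]
    simp [pvTailSums, List.replicate_succ]
  | succ k ih =>
    intro hk
    have hk' : k ≤ ps.length := by omega
    have hrange : PySem.List.pyRange 1 ((k + 1 : Nat) + 1) 1
        = PySem.List.pyRange 1 ((k : Int) + 1) 1 ++ [(k : Int) + 1] := by
      rw [show ((k + 1 : Nat) : Int) + 1 = ((k : Int) + 1) + 1 by push_cast; ring]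
      exact PySem.List.pyRange_one_succ_right (by omega)
    rw [hrange, List.foldl_append, ih hk']
    simp only [List.foldl_cons, List.foldl_nil]
    have hTlen : (pvTailSums 0 (ps.take k)).length = k := by
      rw [pv_tailSums_length, List.length_take]; omega
    set Ck : List Int := 0 :: pvTailSums 0 (ps.take k) with hCk
    have hCklen : Ck.length = k + 1 := by simp [hCk, hTlen]
    have hidx : (k : Int) + 1 - 1 = ((k : Nat) : Int) := by ring
    have hget_s : PySem.List.pyGetD (Ck ++ List.replicate (ps.length - k) 0) ((k : Nat) : Int) 0
        = 0 + (ps.take k).sum := by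
      rw [PySem.List.pyGetD_natCast, List.getD_eq_getElem?_getD,
        List.getElem?_append_left (by omega), ← List.getD_eq_getElem?_getD]
      have := pv_getD_tailSums_last (ps.take k) 0
      rw [List.length_take, min_eq_left hk'] at this
      exact this
    have hset : ((k : Int) + 1) = (((k + 1 : Nat)) : Int) := by push_cast; ring
    rw [hidx, hget_s, hset, PySem.List.pySetD_natCast, PySem.List.pyGetD_natCast]
    have hrep : List.replicate (ps.length - k) (0 : Int)
        = 0 :: List.replicate (ps.length - (k + 1)) 0 := by
      rw [← List.replicate_succ]; congr 1; omega
    rw [hrep, List.set_append]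
    rw [if_neg (by omega)]
    rw [hCklen, show k + 1 - (k + 1) = 0 by omega]
    have htake : ps.take (k + 1) = ps.take k ++ [ps.getD k 0] := by
      rw [List.take_succ, List.getD_eq_getElem?_getD,
        List.getElem?_eq_getElem (by omega)]
      rfl
    rw [htake]
    simp only [hCk, List.set_cons_succ, List.set_cons_zero]
    rw [pv_tailSums_append]
    simp

lemma pv_sumArr_eq (ps : List Int) : pvSumArr ps = 0 :: pvTailSums 0 ps := by
  have := pv_sumArr_go ps ps.length le_rfl
  simpa [pvSumArr] using this

-- ---- the binary search and the linear scan find the same split point ----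

def pvP (ps : List Int) (pp num num1 mid : Int) : Bool :=
  decide (PySem.List.pyGetD ps (num1 - mid) 0 >
    pp - PySem.List.pyGetD ps ((ps.length : Int) - (num - num1) - mid) 0)

lemma pv_getD_mono (ps : List Int) (hs : ps.Pairwise (· ≤ ·)) (u v : Int)
    (hu : 0 ≤ u) (huv : u ≤ v) (hv : v < (ps.length : Int)) :
    PySem.List.pyGetD ps u 0 ≤ PySem.List.pyGetD ps v 0 := by
  rcases eq_or_lt_of_le huv with h | h
  · rw [h]
  · rw [PySem.List.pyGetD_eq_getElem ps 0 hu (by omega),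
        PySem.List.pyGetD_eq_getElem ps 0 (by omega) hv]
    exact (List.pairwise_iff_getElem.mp hs) u.toNat v.toNat (by omega) (by omega) (by omega)

lemma pv_P_anti (ps : List Int) (hs : ps.Pairwise (· ≤ ·)) (pp num num1 : Int)
    (h1 : num1 ≤ (ps.length : Int)) (h2 : num1 ≤ num) :
    ∀ i j, 1 ≤ i → i ≤ j → j ≤ min num1 ((ps.length : Int) - num) →
      pvP ps pp num num1 j = true → pvP ps pp num num1 i = true := by
  intro i j hi hij hj hPj
  simp only [pvP, decide_eq_true_eq] at hPj ⊢
  have hj1 : j ≤ num1 := le_trans hj (min_le_left _ _)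
  have hj2 : j ≤ (ps.length : Int) - num := le_trans hj (min_le_right _ _)
  have hm1 : PySem.List.pyGetD ps (num1 - j) 0 ≤ PySem.List.pyGetD ps (num1 - i) 0 :=
    pv_getD_mono ps hs (num1 - j) (num1 - i) (by omega) (by omega) (by omega)
  have hm2 : PySem.List.pyGetD ps ((ps.length : Int) - (num - num1) - j) 0
      ≤ PySem.List.pyGetD ps ((ps.length : Int) - (num - num1) - i) 0 :=
    pv_getD_mono ps hs _ _ (by omega) (by omega) (by omega)
  omega

lemma pv_splitGo_char (ps : List Int) (pp num num1 R : Int)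
    (hA : ∀ i j, 1 ≤ i → i ≤ j → j ≤ R → pvP ps pp num num1 j = true → pvP ps pp num num1 i = true) :
    ∀ (fuel : Nat) (left right : Int), (right + 1 - left).toNat ≤ fuel →
      1 ≤ left → left ≤ right + 1 → right ≤ R →
      (∀ i, 1 ≤ i → i < left → pvP ps pp num num1 i = true) →
      (∀ i, right < i → i ≤ R → pvP ps pp num num1 i = false) →
      1 ≤ pvSplitGo ps pp num num1 fuel left right ∧
      pvSplitGo ps pp num num1 fuel left right ≤ R + 1 ∧
      (∀ i, 1 ≤ i → i < pvSplitGo ps pp num num1 fuel left right → pvP ps pp num num1 i = true) ∧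
      (∀ i, pvSplitGo ps pp num num1 fuel left right ≤ i → i ≤ R → pvP ps pp num num1 i = false) := by
  intro fuel
  induction fuel with
  | zero =>
    intro left right hfuel h1 h2 h3 htrue hfalse
    have hlr : right < left := by omega
    refine ⟨h1, by simp only [pvSplitGo]; omega, ?_, ?_⟩
    · simpa [pvSplitGo] using htrue
    · intro i hi hiR
      exact hfalse i (by simp only [pvSplitGo] at hi; omega) hiR
  | succ fuel ih =>
    intro left right hfuel h1 h2 h3 htrue hfalse
    by_cases hlr : left ≤ right
    · rw [pvSplitGo, if_pos hlr]
      have hmid := PySem.Int.floordiv_two_mid_bounds hlr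
      set mid := PySem.Int.floordiv (left + right) 2 with hmiddef
      by_cases hc : PySem.List.pyGetD ps (num1 - mid) 0 >
          pp - PySem.List.pyGetD ps ((ps.length : Int) - (num - num1) - mid) 0
      · rw [if_pos hc]
        have hPmid : pvP ps pp num num1 mid = true := by
          simp only [pvP, decide_eq_true_eq]; exact hc
        refine ih (mid + 1) right (by omega) (by omega) (by omega) h3 ?_ hfalse
        intro i hi hilt
        rcases lt_or_ge i left with h | h
        · exact htrue i hi h
        · exact hA i mid hi (by omega) (by omega) hPmid
      · rw [if_neg hc]
        have hPmid : pvP ps pp num num1 mid = false := by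
          simp only [pvP, decide_eq_false_iff_not]; exact hc
        refine ih left (mid - 1) (by omega) h1 (by omega) (by omega) htrue ?_
        intro i hi hiR
        by_cases hPi : pvP ps pp num num1 i = true
        · have := hA mid i (by omega) (by omega) hiR hPi
          rw [hPmid] at this; exact absurd this (by simp)
        · simpa using hPi
    · rw [pvSplitGo, if_neg hlr]
      exact ⟨h1, by omega, htrue, fun i hi hiR => hfalse i (by omega) hiR⟩

lemma pv_scanGo_char (ps : List Int) (pp num a limit : Int) :
    ∀ (fuel : Nat) (t : Int), 0 ≤ t → (limit - t).toNat ≤ fuel →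
      (∀ i, 1 ≤ i → i ≤ t → pvP ps pp num a i = true) →
      t ≤ pvScanGo ps pp num a limit fuel t ∧
      (pvScanGo ps pp num a limit fuel t ≤ max t limit) ∧
      (∀ i, 1 ≤ i → i ≤ pvScanGo ps pp num a limit fuel t → pvP ps pp num a i = true) ∧
      (pvScanGo ps pp num a limit fuel t < limit →
        pvP ps pp num a (pvScanGo ps pp num a limit fuel t + 1) = false) := by
  intro fuel
  induction fuel with
  | zero =>
    intro t ht hfuel htrue
    refine ⟨le_refl _, ?_, ?_, ?_⟩
    · simp only [pvScanGo]; omega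
    · simpa [pvScanGo] using htrue
    · intro h; simp only [pvScanGo] at h; omega
  | succ fuel ih =>
    intro t ht hfuel htrue
    rw [pvScanGo]
    by_cases hc : t < limit ∧ PySem.List.pyGetD ps (a - t - 1) 0 >
        pp - PySem.List.pyGetD ps ((ps.length : Int) - (num - a) - t - 1) 0
    · rw [if_pos hc]
      have hPt1 : pvP ps pp num a (t + 1) = true := by
        simp only [pvP, decide_eq_true_eq]
        rw [show a - (t + 1) = a - t - 1 by ring,
            show (ps.length : Int) - (num - a) - (t + 1) = (ps.length : Int) - (num - a) - t - 1 by ring]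
        exact hc.2
      have hrec := ih (t + 1) (by omega) (by omega) ?_
      · refine ⟨?_, ?_, hrec.2.2.1, hrec.2.2.2⟩
        · have := hrec.1; omega
        · have h2 := hrec.2.1
          have hlim := hc.1
          rw [max_eq_right (by omega : (t + 1 : Int) ≤ limit)] at h2
          rw [max_eq_right (by omega : t ≤ limit)]
          exact h2
      · intro i hi hile
        rcases eq_or_lt_of_le hile with h | h
        · rw [h]; exact hPt1
        · exact htrue i hi (by omega)
    · rw [if_neg hc]
      push_neg at hc
      refine ⟨le_refl _, le_max_left _ _, htrue, ?_⟩
      intro hlt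
      have := hc hlt
      simp only [pvP, decide_eq_false_iff_not]
      rw [show a - (t + 1) = a - t - 1 by ring,
          show (ps.length : Int) - (num - a) - (t + 1) = (ps.length : Int) - (num - a) - t - 1 by ring]
      omega

lemma pv_left_eq_scan (ps : List Int) (pp num num1 R : Int)
    (hA : ∀ i j, 1 ≤ i → i ≤ j → j ≤ R → pvP ps pp num num1 j = true → pvP ps pp num num1 i = true) :
    pvSplit ps pp num num1 1 R - 1 = pvScan ps pp num num1 R := by
  rcases le_or_gt R 0 with hR | hR
  · have h1 : (R + 1 - 1).toNat = 0 := by omega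
    have h2 : R.toNat = 0 := by omega
    rw [pvSplit, pvScan, h1, h2]
    simp [pvSplitGo, pvScanGo]
  · have hbs := pv_splitGo_char ps pp num num1 R hA (R + 1 - 1).toNat 1 R
      (by omega) (by omega) (by omega) (by omega)
      (by intro i hi hilt; omega)
      (by intro i hi hiR; omega)
    have hsc := pv_scanGo_char ps pp num num1 R R.toNat 0
      (by omega) (by omega) (by intro i hi hile; omega)
    rw [pvSplit, pvScan]
    set L := pvSplitGo ps pp num num1 (R + 1 - 1).toNat 1 R with hL
    set s := pvScanGo ps pp num num1 R R.toNat 0 with hs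
    obtain ⟨hL1, hL2, htrueL, hfalseL⟩ := hbs
    obtain ⟨hs0, hs1, htrueS, hlastS⟩ := hsc
    rw [max_eq_right (by omega : (0 : Int) ≤ R)] at hs1
    rcases lt_trichotomy (L - 1) s with h | h | h
    · have hPL : pvP ps pp num num1 L = false := hfalseL L (le_refl _) (by omega)
      have : pvP ps pp num num1 L = true := htrueS L (by omega) (by omega)
      rw [hPL] at this; exact absurd this (by simp)
    · exact h
    · have h1 : pvP ps pp num num1 (s + 1) = true := htrueL (s + 1) (by omega) (by omega)
      have h2 : pvP ps pp num num1 (s + 1) = false := hlastS (by omega)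
      rw [h1] at h2; exact absurd h2 (by simp)

-- ---- the per-query values agree ----

lemma pv_body_eq (ps pre : List Int) (hs : ps.Pairwise (· ≤ ·)) (p num : Int) :
    pvBodyA ps pre p num ((ps.countP (fun x => decide (x ≤ p)) : Nat) : Int) =
    (let n : Int := ps.length
     let pp := 2 * p
     let cnt : Int := ((ps.filter (fun x => decide (x ≤ p))).map (fun _ => (1 : Int))).sum
     let a := min num cnt
     let limit := min a (n - num)
     let t := pvScan ps pp num a limit
     let num1 := a - t
     let num2 := num - num1
     num2 * pp - (PySem.List.pyGetD pre n 0 - PySem.List.pyGetD pre (n - num2) 0) + PySem.List.pyGetD pre num1 0) := by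
  have hsum : ((ps.filter (fun x => decide (x ≤ p))).map (fun _ => (1 : Int))).sum
      = ((ps.countP (fun x => decide (x ≤ p)) : Nat) : Int) := by
    rw [List.map_const', List.sum_replicate, List.countP_eq_length_filter]
    simp
  have hpp : p <<< (1 : Nat) = 2 * p := by
    rw [Int.shiftLeft_eq]; ring
  simp only [pvBodyA, hsum, hpp]
  set cnt : Int := ((ps.countP (fun x => decide (x ≤ p)) : Nat) : Int) with hcnt
  set num1 : Int := min num cnt with hnum1
  set R : Int := min num1 ((ps.length : Int) - num) with hR
  have hcnt_le : cnt ≤ (ps.length : Int) := by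
    rw [hcnt]
    exact_mod_cast Nat.cast_le.mpr List.countP_le_length
  have hleft := pv_left_eq_scan ps (2 * p) num num1 R
    (pv_P_anti ps hs (2 * p) num num1 (by omega : num1 ≤ (ps.length : Int))
      (by rw [hnum1]; exact min_le_left _ _))
  rw [show num1 - (pvSplit ps (2 * p) num num1 1 R - 1)
      = num1 - (pvScan ps (2 * p) num num1 R) by omega]

-- ---- A's sort-queries + pointer + scatter pass, reduced to an in-order map ----

def pvG (ps pre : List Int) (queries : List (List Int)) (i : Nat) : Int :=
  let q := queries.getD i []
  let p := (PySem.List.pyGet? q 0).getD 0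
  let num := (PySem.List.pyGet? q 1).getD 0
  pvBodyA ps pre p num ((pvTwl ps p : Nat) : Int)

lemma pv_fold_scatter (ps pre : List Int) (queries : List (List Int)) :
    ∀ (ind : List Nat) (j : Nat) (res : List Int),
    (∀ i ∈ ind, j ≤ pvTwl ps ((PySem.List.pyGet? (queries.getD i []) 0).getD 0)) →
    ind.Pairwise (fun a b => (PySem.List.pyGet? (queries.getD a []) 0).getD 0
      ≤ (PySem.List.pyGet? (queries.getD b []) 0).getD 0) →
    (ind.foldl (fun (st : Nat × List Int) i =>
        let q := queries.getD i []
        let p := (PySem.List.pyGet? q 0).getD 0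
        let num := (PySem.List.pyGet? q 1).getD 0
        let j := pvAdvance ps p st.1
        (j, st.2.set i (pvBodyA ps pre p num (j : Int)))) (j, res)).2
      = ind.foldl (fun r i => r.set i (pvG ps pre queries i)) res := by
  intro ind
  induction ind with
  | nil => intro j res _ _; rfl
  | cons i t ih =>
    intro j res hinv hpw
    rcases List.pairwise_cons.mp hpw with ⟨hhead, htail⟩
    have hji : j ≤ pvTwl ps ((PySem.List.pyGet? (queries.getD i []) 0).getD 0) :=
      hinv i (List.mem_cons_self ..)
    simp only [List.foldl_cons]
    rw [pv_adv_eq ps _ j hji]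
    exact ih _ _ (fun i' hi' => pv_twl_mono ps (hhead i' hi')) htail

lemma pv_scatter_not_mem (g : Nat → Int) :
    ∀ (ind : List Nat) (res : List Int) (k : Nat), k ∉ ind →
    (ind.foldl (fun r i => r.set i (g i)) res)[k]? = res[k]? := by
  intro ind
  induction ind with
  | nil => intro res k _; rfl
  | cons i t ih =>
    intro res k hk
    simp only [List.mem_cons, not_or] at hk
    simp only [List.foldl_cons]
    rw [ih _ k hk.2, List.getElem?_set_ne (by exact fun h => hk.1 h.symm)]

lemma pv_scatter_mem (g : Nat → Int) :
    ∀ (ind : List Nat) (res : List Int) (k : Nat), ind.Nodup → k ∈ ind → k < res.length →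
    (ind.foldl (fun r i => r.set i (g i)) res)[k]? = some (g k) := by
  intro ind
  induction ind with
  | nil => intro res k _ hk _; simp at hk
  | cons i t ih =>
    intro res k hnd hk hlen
    rcases List.nodup_cons.mp hnd with ⟨hi, hnd'⟩
    simp only [List.foldl_cons]
    by_cases hik : k = i
    · subst hik
      rw [pv_scatter_not_mem g t _ k hi]
      simp [hlen]
    · rcases List.mem_cons.mp hk with h | h
      · exact absurd h.symm (by simpa using fun h' => hik h'.symm)
      · exact ih _ k hnd' h (by simpa using hlen)

-- ===== VERDICT (by name: the statement is the Claim_ definition above) =====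
theorem minimumRelativeLosses_spec : Claim_equal_minimumRelativeLosses := by
  intro prices queries _ _
  unfold Spec_minimumRelativeLosses minimumRelativeLosses minimumRelativeLosses_alt
  simp only []
  rw [pv_sumArr_eq, pv_prefixB_eq]
  set ps := PySem.List.sorted prices (fun x => x) false with hps
  set pre := (0 : Int) :: pvTailSums 0 ps with hpre
  set m := queries.length with hm
  set kf : Nat → Int := fun x => (PySem.List.pyGet? (queries.getD x []) 0).getD 0 with hkf
  set ind := PySem.List.sorted (List.range m) kf false with hind
  have hpair : ps.Pairwise (· ≤ ·) := by
    simpa using PySem.List.sorted_pairwise prices (fun x => x)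
  have hscatter := pv_fold_scatter ps pre queries ind 0 (List.replicate m 0)
      (fun i _ => Nat.zero_le _)
      (by simpa [hkf] using PySem.List.sorted_pairwise (List.range m) kf)
  rw [hscatter]
  have hnd : ind.Nodup := ((PySem.List.sorted_perm (List.range m) kf false).nodup_iff).mpr
      (List.nodup_range)
  apply List.ext_getElem?
  intro k
  by_cases hkm : k < m
  · rw [pv_scatter_mem _ ind _ k hnd
        (by rw [PySem.List.mem_sorted]; simpa using hkm) (by simpa using hkm)]
    rw [List.getElem?_map, List.getElem?_eq_getElem (by simpa using hkm)]
    simp only [Option.map_some]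
    congr 1
    have hqk : queries[k] = queries.getD k [] := by
      rw [List.getD_eq_getElem?_getD, List.getElem?_eq_getElem (by simpa using hkm)]
      rfl
    rw [hqk]
    simp only [pvG]
    rw [show ((pvTwl ps ((PySem.List.pyGet? (queries.getD k []) 0).getD 0) : Nat) : Int)
        = ((ps.countP (fun x => decide (x ≤ (PySem.List.pyGet? (queries.getD k []) 0).getD 0)) : Nat) : Int) by
      rw [pv_countP_eq_twl ps _ hpair]]
    exact pv_body_eq ps pre hpair _ _
  · rw [pv_scatter_not_mem _ ind _ k
        (by rw [PySem.List.mem_sorted]; simpa using hkm)]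
    rw [List.getElem?_eq_none (by simpa using Nat.le_of_not_lt hkm),
        List.getElem?_eq_none (by simp; omega)]
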